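-- pv_equiv track=rewrite | github.com/helix4u/hermes-agent | skills/media/plex-dj-playlists/scripts/plex_make_playlists.py | build_artist_index
-- ===== SOURCE A (Python) =====
-- def norm(s: str | None) -> str:
--     return (s or "").strip().lower()
--
-- def build_artist_index(tracks: list[dict]) -> dict[str, list[dict]]:
--     by_artist: dict[str, list[dict]] = {}
--     for t in tracks:
--         a = norm(t.get("artist"))
--         if not a:
--             continue
--         by_artist.setdefault(a, []).append(t)
--     for a in by_artist:
--         by_artist[a] = sorted(by_artist[a], key=lambda x: (x.get("year") or "9999", x.get("album") or "", x.get("track") or "0"))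
--     return by_artist
-- ===== SOURCE B (Python) =====
-- def norm(s):
--     return (s or "").strip().lower()
--
-- def _key(t):
--     return (t.get("year") or "9999", t.get("album") or "", t.get("track") or "0")
--
-- def build_artist_index(tracks):
--     keyed = [t for t in tracks if norm(t.get("artist"))]
--     by_artist = {norm(t.get("artist")): [] for t in keyed}
--     for t in sorted(keyed, key=_key):
--         by_artist[norm(t.get("artist"))].append(t)
--     return by_artist
-- ===== Notes on version B (the rewrite author's own statement) =====
-- stated objective: alternative
-- what changed: Instead of collecting tracks per artist and then sorting each artist's bucket separately, B pre-seeds the artist buckets (first-appearance order), stably sorts the whole kept track list once with the same key, and distributes it into the buckets in one pass; stability makes each bucket's subsequence equal to sorting that bucket alone.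
import Mathlib
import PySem

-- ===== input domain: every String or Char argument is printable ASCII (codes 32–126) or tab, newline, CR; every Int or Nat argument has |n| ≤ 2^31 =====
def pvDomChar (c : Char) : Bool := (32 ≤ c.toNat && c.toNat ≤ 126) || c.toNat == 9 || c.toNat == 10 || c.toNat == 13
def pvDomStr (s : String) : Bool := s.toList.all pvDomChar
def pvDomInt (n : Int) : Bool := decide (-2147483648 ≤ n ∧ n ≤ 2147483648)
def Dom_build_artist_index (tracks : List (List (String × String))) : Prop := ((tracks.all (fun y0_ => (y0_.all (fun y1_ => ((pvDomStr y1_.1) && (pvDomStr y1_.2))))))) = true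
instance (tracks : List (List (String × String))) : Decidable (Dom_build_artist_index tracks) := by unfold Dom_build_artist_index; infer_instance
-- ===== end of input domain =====

-- B groups by artist with ONE global stable sort of the kept tracks followed by a single
-- distribution pass (keys pre-seeded in first-appearance order), instead of A's per-artist sorts;
-- objective: alternative decomposition, same exact result.

-- ===== PORT A =====
-- norm(s) = (s or "").strip().lower()  (argument is t.get(...), an Option String; None and "" both give "")
def pyNorm (s : Option String) : String :=
  PySem.Str.lower (PySem.Str.strip (s.getD ""))

-- `t.get(k) or dflt`: None and "" are falsy
def pyOrStr (s : Option String) (dflt : String) : String :=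
  match s with
  | none => dflt
  | some v => if v = "" then dflt else v

def trackArtist (t : List (String × String)) : String :=
  pyNorm ((PySem.Dict.mk t).get? "artist")

-- sort key (year or "9999", album or "", track or "0"); Python tuples compare lexicographically,
-- ported with PySem.List.sorted2 (first component, then the remaining pair lexicographically)
def trackKey1 (t : List (String × String)) : String :=
  pyOrStr ((PySem.Dict.mk t).get? "year") "9999"

def trackKey2 (t : List (String × String)) : Lex (String × String) :=
  toLex (pyOrStr ((PySem.Dict.mk t).get? "album") "",
         pyOrStr ((PySem.Dict.mk t).get? "track") "0")

def build_artist_index (tracks : List (List (String × String))) : List (String × List (List (String × String))) :=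
  -- first loop: by_artist.setdefault(a, []).append(t)  ==  by_artist[a] = by_artist.get(a, []) + [t]
  let by_artist := tracks.foldl (fun d t =>
      let a := trackArtist t
      if a = "" then d else d.modify a [] (fun l => l ++ [t]))
    PySem.Dict.empty
  -- second loop: for a in by_artist: by_artist[a] = sorted(by_artist[a], key=...)
  let by_artist2 := by_artist.keys.foldl (fun d a =>
      d.insert a (PySem.List.sorted2 (d.getD a []) trackKey1 trackKey2 false)) by_artist
  by_artist2.items

-- ===== PORT B =====
def build_artist_index_alt (tracks : List (List (String × String))) : List (String × List (List (String × String))) :=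
  -- keyed = [t for t in tracks if norm(t.get("artist"))]
  let keyed := tracks.filter (fun t => !(trackArtist t == ""))
  -- by_artist = {norm(t.get("artist")): [] for t in keyed}
  let d0 := keyed.foldl (fun d t => d.insert (trackArtist t) ([] : List (List (String × String)))) PySem.Dict.empty
  -- for t in sorted(keyed, key=_key): by_artist[norm(t.get("artist"))].append(t)
  -- (the key exists in d0 for every t in keyed, so `d.modify k [] (· ++ [t])` is exactly append)
  let d1 := (PySem.List.sorted2 keyed trackKey1 trackKey2 false).foldl
      (fun d t => d.modify (trackArtist t) [] (fun l => l ++ [t])) d0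
  d1.items

-- ===== PRECONDITION & SPEC =====
def Spec_build_artist_index (tracks : List (List (String × String))) (out : List (String × List (List (String × String)))) : Prop := out = build_artist_index_alt tracks
instance (tracks : List (List (String × String))) (out : List (String × List (List (String × String)))) : Decidable (Spec_build_artist_index tracks out) := by unfold Spec_build_artist_index; infer_instance

-- ===== CLAIM (what is proved, stated in full; the proofs are below) =====
def Claim_equal_build_artist_index : Prop := ∀ (tracks : List (List (String × String))), Dom_build_artist_index tracks → Spec_build_artist_index tracks (build_artist_index tracks)

-- ===== LEMMAS AND PROOFS =====

-- insertBy unrolled on a cons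
theorem pv_ins_cons {α : Type} (bef : α → α → Bool) (x y : α) (ys : List α) :
    PySem.List.insertBy bef x (y :: ys)
      = if bef x y then x :: y :: ys else y :: PySem.List.insertBy bef x ys := by
  simp [PySem.List.insertBy]

-- x strictly below everything in l goes in front
theorem pv_ins_head {α κ : Type} [LinearOrder κ] (key : α → κ) (x : α) (l : List α)
    (h : ∀ z ∈ l, key x < key z) :
    PySem.List.insertBy (fun a b => decide (key a < key b)) x l = x :: l := by
  cases l with
  | nil => simp [PySem.List.insertBy]
  | cons y ys => rw [pv_ins_cons]; simp [h y (by simp)]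

theorem pv_filter_ins_neg {α : Type} (bef : α → α → Bool) (p : α → Bool) (x : α)
    (hx : p x = false) (l : List α) :
    (PySem.List.insertBy bef x l).filter p = l.filter p := by
  induction l with
  | nil => simp [PySem.List.insertBy, hx]
  | cons y ys ih =>
    rw [pv_ins_cons]
    by_cases hb : bef x y = true
    · simp [hb, List.filter_cons, hx]
    · simp only [hb, if_false, Bool.false_eq_true, List.filter_cons]
      rw [ih]
  
theorem pv_filter_ins_pos {α κ : Type} [LinearOrder κ] (key : α → κ) (p : α → Bool) (x : α)
    (hx : p x = true) :
    ∀ l : List α, l.Pairwise (fun a b => key a ≤ key b) →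
      (PySem.List.insertBy (fun a b => decide (key a < key b)) x l).filter p
        = PySem.List.insertBy (fun a b => decide (key a < key b)) x (l.filter p) := by
  intro l
  induction l with
  | nil => simp [PySem.List.insertBy, hx]
  | cons y ys ih =>
    intro hp
    rw [List.pairwise_cons] at hp
    obtain ⟨hy, hys⟩ := hp
    rw [pv_ins_cons]
    by_cases hb : key x < key y
    · cases hpy : p y with
      | true =>
        simp only [hb, decide_true, if_true, List.filter_cons, hpy, hx, if_true]
        rw [pv_ins_cons]
        simp [hb]
      | false =>
        simp only [hb, decide_true, if_true, List.filter_cons, hpy, hx]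
        simp only [Bool.false_eq_true, if_false]
        rw [pv_ins_head key x (ys.filter p)]
        intro z hz
        exact lt_of_lt_of_le hb (hy z (List.mem_of_mem_filter hz))
    · simp only [hb, decide_false, Bool.false_eq_true, if_false, List.filter_cons]
      cases hpy : p y with
      | true =>
        simp only [if_true]
        rw [pv_ins_cons]
        simp only [hb, decide_false, Bool.false_eq_true, if_false]
        rw [ih hys]
      | false =>
        simp only [Bool.false_eq_true, if_false]
        exact ih hys

theorem pv_sorted_append_singleton {α κ : Type} [LinearOrder κ] (key : α → κ) (xs : List α) (x : α) :
    PySem.List.sorted (xs ++ [x]) key false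
      = PySem.List.insertBy (fun a b => decide (key a < key b)) x (PySem.List.sorted xs key false) := by
  rw [PySem.List.sorted_eq_foldl_insertBy, PySem.List.sorted_eq_foldl_insertBy, List.foldl_append]
  rfl

-- filtering commutes with Python's stable sort
theorem pv_filter_sorted {α κ : Type} [LinearOrder κ] (key : α → κ) (p : α → Bool) (xs : List α) :
    (PySem.List.sorted xs key false).filter p = PySem.List.sorted (xs.filter p) key false := by
  induction xs using List.reverseRecOn with
  | nil => simp [PySem.List.sorted]
  | append_singleton xs x ih =>
    rw [pv_sorted_append_singleton, List.filter_append]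
    cases hx : p x with
    | true =>
      rw [pv_filter_ins_pos key p x hx _ (PySem.List.sorted_pairwise xs key), ih]
      simp only [List.filter_cons, hx, if_true, List.filter_nil]
      rw [pv_sorted_append_singleton]
    | false =>
      rw [pv_filter_ins_neg _ p x hx, ih]
      simp [hx]

-- a fold inserting a constant value leaves every default lookup at that constant
theorem pv_getD_foldl_insert_const {κ ν β : Type} [BEq κ] [LawfulBEq κ] [DecidableEq κ]
    (key : β → κ) (c : ν) :
    ∀ (l : List β) (d : PySem.Dict κ ν), (∀ b, d.getD b c = c) →
      ∀ a, (l.foldl (fun d t => d.insert (key t) c) d).getD a c = c := by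
  intro l
  induction l with
  | nil => intro d h a; exact h a
  | cons t ts ih =>
    intro d h a
    simp only [List.foldl_cons]
    apply ih
    intro b
    rw [PySem.Dict.getD_insert]
    split <;> [rfl; exact h b]

-- updating every key of a nodup key list rewrites the items in place
theorem pv_items_foldl_insert_update {κ ν : Type} [BEq κ] [LawfulBEq κ] [DecidableEq κ]
    (f : κ → ν → ν) (dflt : ν) :
    ∀ (ks : List κ) (d : PySem.Dict κ ν), ks.Nodup → (∀ a ∈ ks, d.contains a = true) →
      (ks.foldl (fun d' a => d'.insert a (f a (d'.getD a dflt))) d).items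
        = d.items.map (fun p => if p.1 ∈ ks then (p.1, f p.1 (d.getD p.1 dflt)) else p) := by
  intro ks
  induction ks with
  | nil => intro d _ _; simp
  | cons a ks ih =>
    intro d hnd hc
    rw [List.nodup_cons] at hnd
    obtain ⟨ha, hks⟩ := hnd
    simp only [List.foldl_cons]
    rw [ih _ hks (by
      intro b hb
      rw [PySem.Dict.contains_insert]
      rw [hc b (List.mem_cons_of_mem a hb)]
      simp)]
    rw [PySem.Dict.items_insert_of_contains _ _ (hc a (List.mem_cons_self))]
    rw [List.map_map]
    apply List.map_congr_left
    intro p _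
    by_cases hpa : p.1 = a
    · subst hpa
      simp only [Function.comp, BEq.rfl, if_true]
      simp only [List.mem_cons]
      simp [ha]
    · have hne : (p.1 == a) = false := by simp [hpa]
      simp only [Function.comp, hne, Bool.false_eq_true, if_false]
      by_cases hpk : p.1 ∈ ks
      · simp only [hpk, if_true, List.mem_cons]
        rw [PySem.Dict.getD_insert]
        simp [hpa]
      · simp only [hpk, if_false]
        have : p.1 ∈ a :: ks ↔ False := by simp [hpa, hpk]
        simp [this]

-- Set.update adds nothing when every element is already present
theorem pv_set_update_self {α : Type} [BEq α] [LawfulBEq α] :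
    ∀ (l : List α) (s : PySem.Set α), (∀ x ∈ l, x ∈ s) → PySem.Set.update s l = s := by
  intro l
  induction l with
  | nil => intro s _; rfl
  | cons x xs ih =>
    intro s h
    show List.foldl PySem.Set.add (PySem.Set.add s x) xs = s
    have hmem : x ∈ s := h x List.mem_cons_self
    have hx : PySem.Set.add s x = s := by
      simp [PySem.Set.add, hmem]
    rw [hx]
    exact ih s (fun y hy => h y (List.mem_cons_of_mem x hy))

-- the nested-Lex key sorted2 implements (proof-side only; not used by the ports)
def trackKeyL (t : List (String × String)) : Lex (String × Lex (String × String)) :=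
  toLex (trackKey1 t, trackKey2 t)

-- sorted2 is sorted with the lexicographic pair key
theorem pv_sorted2_eq_sorted {α κ₁ κ₂ : Type} [LinearOrder κ₁] [LinearOrder κ₂]
    (xs : List α) (k1 : α → κ₁) (k2 : α → κ₂) :
    PySem.List.sorted2 xs k1 k2 false = PySem.List.sorted xs (fun x => toLex (k1 x, k2 x)) false := by
  have hbef : (fun a b => decide (k1 a < k1 b) || (!decide (k1 b < k1 a) && decide (k2 a < k2 b)))
      = (fun a b => decide (toLex (k1 a, k2 a) < toLex (k1 b, k2 b))) := by
    funext a b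
    rcases lt_trichotomy (k1 a) (k1 b) with h | h | h
    · simp [Prod.Lex.toLex_lt_toLex, h]
    · simp [Prod.Lex.toLex_lt_toLex, h]
    · simp [Prod.Lex.toLex_lt_toLex, h, lt_asymm h, ne_of_gt h]
  show List.foldl _ [] xs = _
  rw [PySem.List.sorted_eq_foldl_insertBy, hbef]
  rfl

-- a guarded fold is a fold over the filtered list
theorem pv_foldl_guard {α β : Type} (p : α → Bool) (f : β → α → β) :
    ∀ (l : List α) (init : β),
      l.foldl (fun acc x => if p x then f acc x else acc) init = (l.filter p).foldl f init := by
  intro l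
  induction l with
  | nil => intro init; rfl
  | cons x xs ih =>
    intro init
    simp only [List.foldl_cons, List.filter_cons]
    cases hx : p x with
    | true => simp only [if_true]; exact ih (f init x)
    | false => simp only [Bool.false_eq_true, if_false]; exact ih init

-- Characterisation of port A
theorem pv_A_char (tracks : List (List (String × String))) :
    build_artist_index tracks
      = (PySem.Set.ofList ((tracks.filter (fun t => !(trackArtist t == ""))).map trackArtist)).map
          (fun a => (a, PySem.List.sorted
              ((tracks.filter (fun t => !(trackArtist t == ""))).filter (fun t => trackArtist t == a))
              trackKeyL false)) := by
  have hbody : (fun (d : PySem.Dict String (List (List (String × String)))) t =>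
        let a := trackArtist t
        if a = "" then d else d.modify a [] (fun l => l ++ [t]))
      = (fun d t => if !(trackArtist t == "") then d.modify (trackArtist t) [] (fun l => l ++ [t]) else d) := by
    funext d t
    by_cases h : trackArtist t = "" <;> simp [h]
  have hG : tracks.foldl (fun d t =>
        let a := trackArtist t
        if a = "" then d else d.modify a [] (fun l => l ++ [t])) PySem.Dict.empty
      = (tracks.filter (fun t => !(trackArtist t == ""))).foldl
          (fun d t => d.modify (trackArtist t) [] (fun l => l ++ [t])) PySem.Dict.empty := by
    rw [hbody, pv_foldl_guard]
  set G := tracks.filter (fun t => !(trackArtist t == "")) with hGdef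
  set d := G.foldl (fun d t => d.modify (trackArtist t) [] (fun l => l ++ [t])) PySem.Dict.empty with hd
  have hstep1 : build_artist_index tracks
      = (d.keys.foldl (fun d' a =>
          d'.insert a (PySem.List.sorted2 (d'.getD a []) trackKey1 trackKey2 false)) d).items := by
    unfold build_artist_index
    rw [hG]
  have hkeys : d.keys = PySem.Set.ofList (G.map trackArtist) := by
    rw [hd, PySem.Dict.keys_foldl_modify_key, PySem.Dict.keys_empty]
    rfl
  have hnodup : d.keys.Nodup := by
    rw [hd]
    exact PySem.Dict.nodup_keys_foldl_modify_key _ _ _ _ _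
      (by rw [PySem.Dict.keys_empty]; exact List.nodup_nil)
  have hget : ∀ a, d.getD a [] = G.filter (fun t => trackArtist t == a) := by
    intro a
    have hm : G.foldl (fun d t => d.modify (trackArtist t) [] (fun l => l ++ [t])) PySem.Dict.empty
        = (G.map (fun t => (trackArtist t, t))).foldl
            (fun d p => d.modify p.1 [] (fun l => l ++ [p.2])) PySem.Dict.empty := by
      rw [List.foldl_map]
    rw [hd, hm, PySem.Dict.getD_foldl_modify_append, PySem.Dict.getD_empty,
      List.filter_map, List.map_map]
    simp [Function.comp_def]
  have hitems : d.items = d.keys.map (fun a => (a, G.filter (fun t => trackArtist t == a))) := by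
    rw [PySem.Dict.items_eq_map_keys d hnodup ([])]
    exact List.map_congr_left (fun a _ => by rw [hget a])
  unfold trackKeyL
  rw [hstep1]
  simp only [pv_sorted2_eq_sorted]
  rw [pv_items_foldl_insert_update
    (fun (_ : String) v => PySem.List.sorted v (fun x => toLex (trackKey1 x, trackKey2 x)) false)
    [] d.keys d hnodup
    (fun a ha => (PySem.Dict.contains_iff_mem_keys _ _).mpr ha)]
  rw [hitems, ← hkeys, List.map_map]
  apply List.map_congr_left
  intro a ha
  simp only [Function.comp]
  rw [if_pos ha, hget a]

-- Characterisation of port B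
theorem pv_B_char (tracks : List (List (String × String))) :
    build_artist_index_alt tracks
      = (PySem.Set.ofList ((tracks.filter (fun t => !(trackArtist t == ""))).map trackArtist)).map
          (fun a => (a, PySem.List.sorted
              ((tracks.filter (fun t => !(trackArtist t == ""))).filter (fun t => trackArtist t == a))
              trackKeyL false)) := by
  set G := tracks.filter (fun t => !(trackArtist t == "")) with hGdef
  set d0 := G.foldl (fun d t =>
      d.insert (trackArtist t) ([] : List (List (String × String)))) PySem.Dict.empty with hd0
  unfold trackKeyL
  set S := PySem.List.sorted2 G trackKey1 trackKey2 false with hS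
  have hS2 : S = PySem.List.sorted G (fun x => toLex (trackKey1 x, trackKey2 x)) false := by
    rw [hS, pv_sorted2_eq_sorted]
  set d1 := S.foldl (fun d t => d.modify (trackArtist t) [] (fun l => l ++ [t])) d0 with hd1
  have hstep : build_artist_index_alt tracks = d1.items := rfl
  have hkeys0 : d0.keys = PySem.Set.ofList (G.map trackArtist) := by
    rw [hd0, PySem.Dict.keys_foldl_insert_key, PySem.Dict.keys_empty]
    rfl
  have hnodup0 : d0.keys.Nodup := by
    rw [hd0]
    exact PySem.Dict.nodup_keys_foldl_insert_key _ _ _ _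
      (by rw [PySem.Dict.keys_empty]; exact List.nodup_nil)
  have hget0 : ∀ a, d0.getD a [] = [] := by
    intro a
    rw [hd0]
    exact pv_getD_foldl_insert_const trackArtist [] G PySem.Dict.empty
      (fun b => PySem.Dict.getD_empty b []) a
  have hkeys1 : d1.keys = d0.keys := by
    rw [hd1, PySem.Dict.keys_foldl_modify_key]
    apply pv_set_update_self
    intro x hx
    obtain ⟨t, ht, rfl⟩ := List.mem_map.mp hx
    rw [hkeys0]
    exact (PySem.Set.mem_ofList _ _).mpr
      (List.mem_map_of_mem ((PySem.List.mem_sorted _ _ _ _).mp (hS2 ▸ ht)))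
  have hnodup1 : d1.keys.Nodup := by
    rw [hd1]
    exact PySem.Dict.nodup_keys_foldl_modify_key _ _ _ _ _ hnodup0
  have hget1 : ∀ a, d1.getD a [] = S.filter (fun t => trackArtist t == a) := by
    intro a
    have hm : S.foldl (fun d t => d.modify (trackArtist t) [] (fun l => l ++ [t])) d0
        = (S.map (fun t => (trackArtist t, t))).foldl
            (fun d p => d.modify p.1 [] (fun l => l ++ [p.2])) d0 := by
      rw [List.foldl_map]
    rw [hd1, hm, PySem.Dict.getD_foldl_modify_append, hget0 a,
      List.filter_map, List.map_map]
    simp [Function.comp_def]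
  rw [hstep, PySem.Dict.items_eq_map_keys d1 hnodup1 ([]), hkeys1, hkeys0]
  apply List.map_congr_left
  intro a ha
  rw [hget1 a, hS2, pv_filter_sorted]

-- ===== VERDICT (by name: the statement is the Claim_ definition above) =====
theorem build_artist_index_spec : Claim_equal_build_artist_index := by
  intro tracks _
  show build_artist_index tracks = build_artist_index_alt tracks
  rw [pv_A_char, pv_B_char]
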